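-- pv_equiv track=rewrite | github.com/guebe/aoc2024 | day17/part2.py | to_A
-- ===== SOURCE A (Python) =====
-- def out(A): # this is just a manually simplified formula of the disassembler output
--     B = (A%8)^2
--     return (B ^ 7 ^ (A>>B)) % 8
--
-- def to_A(program):
--     probes = set([0])
--     for x in reversed(program):
--         new_probes = set()
--         for probe in probes:
--            for i in range(8):
--                if out(probe*8 + i) == x:
--                    new_probes.add(probe*8 + i)
--         probes = new_probes
--     return probes
-- ===== SOURCE B (Python) =====
-- def out(A): # same manually simplified disassembler formula as the original module
--     B = (A%8)^2
--     return (B ^ 7 ^ (A>>B)) % 8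
--
-- def to_A(program):
--     # recursive DFS over program positions, from the last digit toward the first
--     def solve(index, A):
--         if index < 0:
--             return [A]
--         leaves = []
--         for i in range(8):
--             cand = A*8 + i
--             if out(cand) == program[index]:
--                 leaves.extend(solve(index - 1, cand))
--         return leaves
--     return set(solve(len(program) - 1, 0))
-- ===== Notes on version B (the rewrite author's own statement) =====
-- stated objective: alternative
-- what changed: Replaced the iterative set-frontier BFS (one candidate set per program digit) by a recursive DFS solve(index, A) that walks the program from the last digit toward the first, accumulating leaves in a plain list and converting to a set once at the end.
import Mathlib
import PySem

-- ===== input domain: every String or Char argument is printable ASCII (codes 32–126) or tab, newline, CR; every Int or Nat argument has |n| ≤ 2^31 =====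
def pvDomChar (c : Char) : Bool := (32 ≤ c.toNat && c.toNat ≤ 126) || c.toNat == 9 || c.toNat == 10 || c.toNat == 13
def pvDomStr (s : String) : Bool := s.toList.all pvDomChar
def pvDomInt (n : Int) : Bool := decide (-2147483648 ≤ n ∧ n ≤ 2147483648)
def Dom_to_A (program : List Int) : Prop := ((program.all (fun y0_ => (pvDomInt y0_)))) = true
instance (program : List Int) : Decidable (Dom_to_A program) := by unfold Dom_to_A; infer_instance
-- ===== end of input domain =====

-- B replaces A's set-frontier BFS (one frontier per program digit) with a recursive DFS over program
-- positions, last digit first, collecting the surviving A values as leaves (objective: alternative).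

-- ===== PORT A =====
-- helper out(A): `%` is Python's floor mod (PySem.Int.mod), `^` is int xor (PySem.Int.bxor),
-- `A >> B` is `A >>> B.toNat` (exact here: B = (A%8)^2 always lies in [0,8), so toNat loses nothing).
def pvOut (A : Int) : Int :=
  let B : Int := PySem.Int.bxor (PySem.Int.mod A 8) 2
  PySem.Int.mod (PySem.Int.bxor (PySem.Int.bxor B 7) (A >>> B.toNat)) 8

def to_A (program : List Int) : List Int :=
  let probes : PySem.Set Int := PySem.Set.ofList [0]
  program.reverse.foldl
    (fun probes x =>
      probes.foldl
        (fun new_probes probe =>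
          (PySem.List.pyRange 0 8).foldl
            (fun new_probes i =>
              if pvOut (probe * 8 + i) = x then PySem.Set.add new_probes (probe * 8 + i)
              else new_probes)
            new_probes)
        PySem.Set.empty)
    probes

-- ===== PORT B =====
-- solve(index, A) of Source B; fuel k corresponds to index = k - 1 (the base case index < 0 is fuel 0).
-- program[index] is ported as pyGetD with default 0: every call from to_A_alt has 0 ≤ index < len(program).
def pvSolve (program : List Int) : Nat → Int → List Int
  | 0, A => [A]
  | k + 1, A =>
      (PySem.List.pyRange 0 8).foldl
        (fun leaves i =>
          if pvOut (A * 8 + i) = PySem.List.pyGetD program (k : Int) 0 then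
            leaves ++ pvSolve program k (A * 8 + i)
          else leaves)
        []

def to_A_alt (program : List Int) : List Int :=
  PySem.Set.ofList (pvSolve program program.length 0)

-- ===== PRECONDITION & SPEC =====
def Spec_to_A (program : List Int) (out : List Int) : Prop := out = to_A_alt program
instance (program : List Int) (out : List Int) : Decidable (Spec_to_A program out) := by unfold Spec_to_A; infer_instance

-- ===== CLAIM (what is proved, stated in full; the proofs are below) =====
def Claim_equal_to_A : Prop := ∀ (program : List Int), Dom_to_A program → Spec_to_A program (to_A program)

-- ===== LEMMAS AND PROOFS =====

-- the candidates that one probe p contributes at digit x, in i order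
def pvChild (x p : Int) : List Int :=
  ((PySem.List.pyRange 0 8).filter (fun i => pvOut (p * 8 + i) = x)).map (fun i => p * 8 + i)

lemma pvChild_eq_filter_map (x p : Int) :
    pvChild x p = ((PySem.List.pyRange 0 8).filter (fun i => pvOut (p * 8 + i) = x)).map (fun i => p * 8 + i) := rfl

lemma pvChild_bounds {x p c : Int} (h : c ∈ pvChild x p) : p * 8 ≤ c ∧ c < p * 8 + 8 := by
  unfold pvChild at h
  simp only [List.mem_map, List.mem_filter] at h
  obtain ⟨i, ⟨hi, _⟩, rfl⟩ := h
  have := PySem.List.mem_pyRange_one.mp hi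
  omega

-- B's conditional-extend loop is the append of a filtered flatMap
lemma pvFoldl_extend_if (p : Int → Prop) [DecidablePred p] (g : Int → List Int)
    (l : List Int) (acc : List Int) :
    l.foldl (fun res i => if p i then res ++ g i else res) acc
      = acc ++ (l.filter (fun i => decide (p i))).flatMap g := by
  induction l generalizing acc with
  | nil => simp
  | cons a l ih =>
    simp only [List.foldl_cons, List.filter_cons]
    by_cases h : p a
    · simp [h, ih, List.flatMap_cons]
    · simp [h, ih]

-- A's inner i-loop: when no added candidate is already present, Set.add is plain accumulation
lemma pvInner_eq (x p : Int) (l : List Int) (acc : List Int)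
    (hnd : (l.map (fun i => p * 8 + i)).Nodup)
    (hfree : ∀ i ∈ l, pvOut (p * 8 + i) = x → p * 8 + i ∉ acc) :
    l.foldl (fun np i => if pvOut (p * 8 + i) = x then PySem.Set.add np (p * 8 + i) else np) acc
      = acc ++ ((l.filter (fun i => pvOut (p * 8 + i) = x)).map (fun i => p * 8 + i)) := by
  induction l generalizing acc with
  | nil => simp
  | cons a l ih =>
    simp only [List.map_cons, List.nodup_cons, List.mem_map] at hnd
    obtain ⟨ha, hnd⟩ := hnd
    simp only [List.foldl_cons, List.filter_cons]
    by_cases h : pvOut (p * 8 + a) = x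
    · rw [if_pos h, PySem.Set.add_of_not_mem (hfree a (by simp) h)]
      have hfree' : ∀ i ∈ l, pvOut (p * 8 + i) = x → p * 8 + i ∉ acc ++ [p * 8 + a] := by
        intro i hi hc
        simp only [List.mem_append, List.mem_singleton]
        push Not
        exact ⟨hfree i (by simp [hi]) hc, fun he => ha ⟨i, hi, he⟩⟩
      rw [ih _ hnd hfree']
      simp [h]
    · rw [if_neg h, ih _ hnd (fun i hi hc => hfree i (by simp [hi]) hc)]
      simp [h]

-- A's probe loop: children of distinct probes are disjoint, so one BFS step is a flatMap
lemma pvStep_eq (x : Int) (probes : List Int) (acc : List Int) (hnd : probes.Nodup)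
    (hfree : ∀ p ∈ probes, ∀ c ∈ pvChild x p, c ∉ acc) :
    probes.foldl
        (fun new_probes probe =>
          (PySem.List.pyRange 0 8).foldl
            (fun new_probes i =>
              if pvOut (probe * 8 + i) = x then PySem.Set.add new_probes (probe * 8 + i)
              else new_probes)
            new_probes)
        acc
      = acc ++ probes.flatMap (pvChild x) := by
  induction probes generalizing acc with
  | nil => simp
  | cons p ps ih =>
    simp only [List.nodup_cons] at hnd
    obtain ⟨hp, hnd⟩ := hnd
    simp only [List.foldl_cons]
    rw [pvInner_eq]
    · rw [ih _ hnd]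
      · simp [List.flatMap_cons, pvChild_eq_filter_map]
      · intro q hq c hc
        simp only [List.mem_append]
        push Not
        refine ⟨hfree q (by simp [hq]) c hc, ?_⟩
        rw [← pvChild_eq_filter_map]
        intro hcp
        have h1 := pvChild_bounds hc
        have h2 := pvChild_bounds hcp
        have : p = q := by omega
        exact hp (this ▸ hq)
    · have : Function.Injective (fun i : Int => p * 8 + i) := by
        intro a b h; simpa using h
      exact (PySem.List.nodup_pyRange_one 0 8).map this
    · intro i hi hc
      refine hfree p (by simp) _ ?_
      simp only [pvChild_eq_filter_map, List.mem_map]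
      exact ⟨i, List.mem_filter.mpr ⟨hi, by simpa using hc⟩, rfl⟩

-- B's one-step unfolding in the same flatMap form
lemma pvSolve_succ (program : List Int) (k : Nat) (A : Int) :
    pvSolve program (k + 1) A
      = (pvChild (PySem.List.pyGetD program (k : Int) 0) A).flatMap (pvSolve program k) := by
  show (PySem.List.pyRange 0 8).foldl _ [] = _
  rw [pvFoldl_extend_if (fun i => pvOut (A * 8 + i) = PySem.List.pyGetD program (k : Int) 0)
        (fun i => pvSolve program k (A * 8 + i))]
  simp [pvChild_eq_filter_map, List.flatMap_map]

-- every leaf grown from seed A in k steps lies in [A·8^k, (A+1)·8^k)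
lemma pvSolve_bounds (program : List Int) (k : Nat) (A : Int) :
    ∀ c ∈ pvSolve program k A, A * 8 ^ k ≤ c ∧ c < (A + 1) * 8 ^ k := by
  induction k generalizing A with
  | zero => intro c hc; simp [pvSolve] at hc; simp [hc]
  | succ k ih =>
    intro c hc
    rw [pvSolve_succ, List.mem_flatMap] at hc
    obtain ⟨b, hb, hc⟩ := hc
    have hbb := pvChild_bounds hb
    have := ih b c hc
    have h8 : (0:Int) < 8 ^ k := by positivity
    constructor
    · calc A * 8 ^ (k+1) = (A * 8) * 8 ^ k := by ring
        _ ≤ b * 8 ^ k := by nlinarith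
        _ ≤ c := this.1
    · have hb1 : b + 1 ≤ A * 8 + 8 := by linarith [hbb.2]
      have hmul := mul_le_mul_of_nonneg_right hb1 h8.le
      calc c < (b + 1) * 8 ^ k := this.2
        _ ≤ (A * 8 + 8) * 8 ^ k := hmul
        _ = (A + 1) * 8 ^ (k+1) := by ring

lemma pvNodup_flatMap (l : List Int) (g : Int → List Int) (hl : l.Nodup)
    (hg : ∀ a ∈ l, (g a).Nodup)
    (hdisj : l.Pairwise (fun a b => ∀ c ∈ g a, c ∉ g b)) :
    (l.flatMap g).Nodup := by
  induction l with
  | nil => simp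
  | cons a l ih =>
    simp only [List.nodup_cons] at hl
    rw [List.pairwise_cons] at hdisj
    rw [List.flatMap_cons]
    refine List.Nodup.append (hg a (by simp)) (ih hl.2 (fun b hb => hg b (by simp [hb])) hdisj.2) ?_
    intro c hca hcl
    rw [List.mem_flatMap] at hcl
    obtain ⟨b, hb, hcb⟩ := hcl
    exact hdisj.1 b hb c hca hcb

lemma pvInterval_disjoint (k : Nat) (p q c : Int) (hpq : p ≠ q)
    (h1 : p * 8 ^ k ≤ c) (h2 : c < (p + 1) * 8 ^ k)
    (h3 : q * 8 ^ k ≤ c) (h4 : c < (q + 1) * 8 ^ k) : False := by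
  have h8 : (0:Int) < 8 ^ k := by positivity
  rcases lt_or_gt_of_ne hpq with h | h
  · nlinarith
  · nlinarith

lemma pvChild_nodup (x p : Int) : (pvChild x p).Nodup := by
  rw [pvChild_eq_filter_map]
  refine List.Nodup.map ?_ ((PySem.List.nodup_pyRange_one 0 8).filter _)
  intro a b h; simpa using h

lemma pvSolve_nodup (program : List Int) (k : Nat) (A : Int) :
    (pvSolve program k A).Nodup := by
  induction k generalizing A with
  | zero => simp [pvSolve]
  | succ k ih =>
    rw [pvSolve_succ]
    refine pvNodup_flatMap _ _ (pvChild_nodup _ _) (fun b _ => ih b) ?_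
    refine List.Pairwise.imp_of_mem ?_
      (pvChild_nodup (PySem.List.pyGetD program (k : Int) 0) A : List.Pairwise (· ≠ ·) _)
    intro b b' hb hb' hne c hc hc'
    exact pvInterval_disjoint k b b' c hne (pvSolve_bounds _ _ _ c hc).1
      (pvSolve_bounds _ _ _ c hc).2 (pvSolve_bounds _ _ _ c hc').1 (pvSolve_bounds _ _ _ c hc').2

lemma pvChildren_nodup (x : Int) (probes : List Int) (hnd : probes.Nodup) :
    (probes.flatMap (pvChild x)).Nodup := by
  refine pvNodup_flatMap _ _ hnd (fun p _ => pvChild_nodup x p) ?_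
  refine List.Pairwise.imp_of_mem ?_ (hnd : List.Pairwise (· ≠ ·) _)
  intro p q hp hq hne c hc hc'
  have h1 := pvChild_bounds hc
  have h2 := pvChild_bounds hc'
  omega

-- BFS over the last n digits from a duplicate-free frontier = concatenated DFS from each frontier seed
lemma pvMain (program : List Int) (n : Nat) (hn : n ≤ program.length)
    (probes : List Int) (hnd : probes.Nodup) :
    ((program.take n).reverse).foldl
      (fun probes x =>
        probes.foldl
          (fun new_probes probe =>
            (PySem.List.pyRange 0 8).foldl
              (fun new_probes i =>
                if pvOut (probe * 8 + i) = x then PySem.Set.add new_probes (probe * 8 + i)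
                else new_probes)
              new_probes)
          PySem.Set.empty)
      probes
    = probes.flatMap (pvSolve program n) := by
  induction n generalizing probes with
  | zero =>
    simp only [List.take_zero, List.reverse_nil, List.foldl_nil]
    simp [pvSolve]
  | succ n ih =>
    have hlt : n < program.length := by omega
    rw [List.take_add_one, List.getElem?_eq_getElem hlt]
    simp only [Option.toList_some, List.reverse_append, List.reverse_singleton,
      List.singleton_append, List.foldl_cons]
    rw [pvStep_eq _ _ _ hnd (by simp [PySem.Set.empty])]
    have : (PySem.Set.empty : List Int) ++ probes.flatMap (pvChild program[n]) =
        probes.flatMap (pvChild program[n]) := by simp [PySem.Set.empty]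
    rw [this, ih (by omega) _ (pvChildren_nodup _ _ hnd)]
    rw [List.flatMap_assoc]
    congr 1
    funext p
    rw [pvSolve_succ]
    congr 1
    rw [PySem.List.pyGetD_natCast]
    simp [List.getD_eq_getElem?_getD, List.getElem?_eq_getElem hlt]

-- ===== VERDICT (by name: the statement is the Claim_ definition above) =====
theorem to_A_spec : Claim_equal_to_A := by
  intro program _
  unfold Spec_to_A to_A to_A_alt
  rw [PySem.Set.ofList_eq_self_of_nodup _ (pvSolve_nodup program program.length 0)]
  have h0 : (PySem.Set.ofList [(0:Int)]) = [0] := rfl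
  rw [h0]
  have := pvMain program program.length le_rfl [0] (by simp)
  rw [List.take_length] at this
  rw [this, List.flatMap_singleton]
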